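-- pv_equiv track=rewrite | github.com/artemis-sbs/sbs_utils | sbs_utils/mast/mast.py | first_non_whitespace_index
-- ===== SOURCE A (Python) =====
-- def first_non_whitespace_index(s):
--     nl = 0
--     nl_idx=0
--     for idx, c in enumerate(s):
--         if c != '\n' and c != '\t' and c != ' ':
--             return (idx,nl, nl_idx)
--         if c == '\n':
--             nl+=1
--             nl_idx = idx
--     return (len(s), nl, nl_idx)
-- ===== SOURCE B (Python) =====
-- def first_non_whitespace_index(s):
--     idx = next((i for i, c in enumerate(s) if c not in ' \t\n'), len(s))
--     nls = [i for i, c in enumerate(s[:idx]) if c == '\n']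
--     return (idx, len(nls), nls[-1] if nls else 0)
-- ===== Notes on version B (the rewrite author's own statement) =====
-- stated objective: idiomatic
-- what changed: Replaces A's single fused early-exit loop with accumulators by computing the boundary index first (first non-whitespace position via a generator/next), then deriving the newline count and last newline index from a comprehension of newline positions in the prefix.
import Mathlib
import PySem

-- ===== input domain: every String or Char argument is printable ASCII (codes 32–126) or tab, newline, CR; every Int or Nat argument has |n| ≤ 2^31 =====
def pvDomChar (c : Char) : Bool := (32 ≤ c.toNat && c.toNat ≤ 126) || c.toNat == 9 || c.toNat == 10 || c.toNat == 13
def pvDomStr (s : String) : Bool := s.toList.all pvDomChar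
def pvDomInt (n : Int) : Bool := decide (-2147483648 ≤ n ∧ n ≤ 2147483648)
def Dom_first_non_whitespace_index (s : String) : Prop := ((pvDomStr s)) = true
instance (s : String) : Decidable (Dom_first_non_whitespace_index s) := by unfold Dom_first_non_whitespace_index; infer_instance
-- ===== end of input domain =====

-- B computes the whitespace boundary first, then derives newline count and last
-- newline index from the list of newline positions in the prefix (idiomatic decomposition).


-- ===== PORT A =====
-- the enumerate loop with accumulators idx, nl, nl_idx; at exhaustion the running
-- index equals len(s), so returning it matches A's 'return (len(s), nl, nl_idx)'
def fnwGoA : List Char → Int → Int → Int → Int × Int × Int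
  | [], idx, nl, nlIdx => (idx, nl, nlIdx)
  | c :: rest, idx, nl, nlIdx =>
    if c ≠ '\n' ∧ c ≠ '\t' ∧ c ≠ ' ' then (idx, nl, nlIdx)
    else if c = '\n' then fnwGoA rest (idx + 1) (nl + 1) idx
    else fnwGoA rest (idx + 1) nl nlIdx

def first_non_whitespace_index (s : String) : Int × Int × Int :=
  fnwGoA s.toList 0 0 0

-- ===== PORT B =====
def first_non_whitespace_index_alt (s : String) : Int × Int × Int :=
  let cs := s.toList
  -- idx = next((i for i, c in enumerate(s) if c not in ' \t\n'), len(s))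
  let idx : Int :=
    match cs.findIdx? (fun c => !(c == ' ' || c == '\t' || c == '\n')) with
    | some i => (i : Int)
    | none => (cs.length : Int)
  -- nls = [i for i, c in enumerate(s[:idx]) if c == '\n']
  let nls : List Int :=
    ((PySem.List.enumerate (PySem.List.slice cs none (some idx)) 0).filter
      (fun p => p.2 == '\n')).map (·.1)
  (idx, (nls.length : Int), if nls.isEmpty then 0 else (PySem.List.pyGet? nls (-1)).getD 0)

-- ===== PRECONDITION & SPEC =====
def Spec_first_non_whitespace_index (s : String) (out : Int × Int × Int) : Prop := out = first_non_whitespace_index_alt s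
instance (s : String) (out : Int × Int × Int) : Decidable (Spec_first_non_whitespace_index s out) := by unfold Spec_first_non_whitespace_index; infer_instance

-- ===== CLAIM (what is proved, stated in full; the proofs are below) =====
def Claim_equal_first_non_whitespace_index : Prop := ∀ (s : String), Dom_first_non_whitespace_index s → Spec_first_non_whitespace_index s (first_non_whitespace_index s)

-- ===== LEMMAS AND PROOFS =====
-- whitespace test of the loop, as a Bool predicate
def fnwWs (c : Char) : Bool := c == ' ' || c == '\t' || c == '\n'

-- newline positions of a char list, counted from start index i
def fnwN (l : List Char) (i : Int) : List Int :=
  ((PySem.List.enumerate l i).filter (fun p => p.2 == '\n')).map (·.1)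

theorem fnwN_nil (i : Int) : fnwN [] i = [] := rfl

theorem fnwN_cons (c : Char) (l : List Char) (i : Int) :
    fnwN (c :: l) i = (if c == '\n' then [i] else []) ++ fnwN l (i + 1) := by
  cases hc : (c == '\n') <;>
    simp [fnwN, PySem.List.enumerate_cons, hc]

theorem fnwGetLast_cons (a j : Int) (M : List Int) :
    (a :: M).getLast?.getD j = M.getLast?.getD a := by
  cases M with
  | nil => rfl
  | cons b t => rw [List.getLast?_cons_cons]; cases h : (b :: t).getLast? <;> simp_all [List.getLast?]

theorem fnwGoA_eq (l : List Char) (i nl j : Int) :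
    fnwGoA l i nl j =
      ( i + ((l.takeWhile fnwWs).length : Int),
        nl + ((fnwN (l.takeWhile fnwWs) i).length : Int),
        (fnwN (l.takeWhile fnwWs) i).getLast?.getD j ) := by
  induction l generalizing i nl j with
  | nil => simp [fnwGoA, fnwN_nil]
  | cons c rest ih =>
    by_cases hw : fnwWs c = true
    · have hws : ¬ (c ≠ '\n' ∧ c ≠ '\t' ∧ c ≠ ' ') := by
        intro hcon
        simp [fnwWs, hcon.1, hcon.2.1, hcon.2.2] at hw
      rw [show (c :: rest).takeWhile fnwWs = c :: rest.takeWhile fnwWs by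
        simp [hw]]
      by_cases hn : c = '\n'
      · subst hn
        simp only [fnwGoA, if_neg hws, ih]
        rw [fnwN_cons]
        simp only [beq_self_eq_true, if_pos, List.singleton_append, Prod.mk.injEq,
          List.length_cons]
        refine ⟨by push_cast; ring, by push_cast; ring, (fnwGetLast_cons i j _).symm⟩
      · have hni : ¬ (c == '\n') = true := by simp [hn]
        simp only [fnwGoA, if_neg hws, if_neg hn, ih]
        rw [fnwN_cons]
        simp [hni]
        ring
    · have hws : (c ≠ '\n' ∧ c ≠ '\t' ∧ c ≠ ' ') := by
        refine ⟨?_, ?_, ?_⟩ <;> intro hh <;> simp [fnwWs, hh] at hw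
      rw [show (c :: rest).takeWhile fnwWs = [] by simp [hw]]
      simp [fnwGoA, hws, fnwN_nil]

-- B's boundary computation equals the takeWhile length
theorem fnwIdx_eq (l : List Char) :
    (match l.findIdx? (fun c => !fnwWs c) with
      | some i => (i : Int)
      | none => (l.length : Int)) = ((l.takeWhile fnwWs).length : Int) := by
  induction l with
  | nil => simp [List.findIdx?_nil]
  | cons c rest ih =>
    by_cases hw : fnwWs c = true
    · simp only [List.findIdx?_cons, hw, Bool.not_true, List.takeWhile_cons]
      cases h : rest.findIdx? (fun c => !fnwWs c) with
      | none => simp [h] at ih ⊢; omega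
      | some k => simp [h] at ih ⊢; omega
    · simp [List.findIdx?_cons, hw]

-- pyGet? at -1 on a nonempty list is getLast?
theorem fnwPyGet_neg_one (l : List Int) (h : l ≠ []) :
    (PySem.List.pyGet? l (-1)).getD 0 = l.getLast?.getD 0 := by
  have h1 : 1 ≤ l.length := List.length_pos_iff.mpr h
  unfold PySem.List.pyGet? PySem.List.pyIdx?
  rw [if_neg (show ¬ ((0:Int) ≤ -1) by omega),
    if_pos (show -((l.length : Int)) ≤ -1 by omega), List.getLast?_eq_getElem?,
    List.getElem?_eq_getElem (show l.length - 1 < l.length by omega)]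
  simp [List.getElem?_eq_getElem (show l.length - 1 < l.length by omega)]

-- ===== VERDICT (by name: the statement is the Claim_ definition above) =====
theorem first_non_whitespace_index_spec : Claim_equal_first_non_whitespace_index := by
  intro s _
  unfold Spec_first_non_whitespace_index first_non_whitespace_index first_non_whitespace_index_alt
  have hfd := fnwIdx_eq s.toList
  have hg := fnwGoA_eq s.toList 0 0 0
  simp only [show (fun c => !(c == ' ' || c == '\t' || c == '\n')) = (fun c => !fnwWs c) from rfl]
  rw [hfd]
  have hslice : PySem.List.slice s.toList none (some ((s.toList.takeWhile fnwWs).length : Int))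
      = s.toList.takeWhile fnwWs := by
    rw [PySem.List.slice_to]
    case hb => exact Int.natCast_nonneg _
    obtain ⟨t, ht⟩ := s.toList.takeWhile_prefix fnwWs
    simp only [Int.toNat_natCast]
    conv_lhs => rw [← ht]
    exact List.take_left' (by rw [ht])
  rw [hslice, hg]
  have hNdef : ((PySem.List.enumerate (s.toList.takeWhile fnwWs) 0).filter
      (fun p => p.2 == '\n')).map (·.1) = fnwN (s.toList.takeWhile fnwWs) 0 := rfl
  rw [hNdef]
  refine Prod.ext (by simp) (Prod.ext (by simp) ?_)
  by_cases hN : fnwN (s.toList.takeWhile fnwWs) 0 = []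
  · simp [hN]
  · rw [if_neg (by simp [hN])]
    exact (fnwPyGet_neg_one _ hN).symm
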